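-- pv_equiv track=rewrite | github.com/MatheusCercena/PyCad | src/drenos.py | normalizar_drenos
-- ===== SOURCE A (Python) =====
-- def normalizar_drenos(medidas, medida_lado) -> list[int]:
--     ini = 0
--     coodenadas_normalizadas = []
--     for i, dreno in enumerate(medidas):
--         if medida_lado >= 600 and i == len(medidas) - 2:
--             coord_ini_norm = ini
--             coord_fim_norm = medida_lado - 200
--         elif medida_lado >= 600 and i == len(medidas) - 1:
--             coord_ini_norm = medida_lado - 200
--             coord_fim_norm = medida_lado
--         else:
--             coord_ini_norm = ini
--             coord_fim_norm = coord_ini_norm + dreno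
--         coodenadas_normalizadas.append((coord_ini_norm, coord_fim_norm))
--         ini = coord_fim_norm
--
--     return coodenadas_normalizadas
-- ===== SOURCE B (Python) =====
-- def normalizar_drenos(medidas, medida_lado) -> list[int]:
--     n = len(medidas)
--     starts = [0]
--     s = 0
--     for m in medidas:
--         s += m
--         starts.append(s)
--     if medida_lado >= 600 and n >= 1:
--         res = [(starts[i], starts[i + 1]) for i in range(max(n - 2, 0))]
--         if n >= 2:
--             res.append((starts[n - 2], medida_lado - 200))
--         res.append((medida_lado - 200, medida_lado))
--         return res
--     return [(starts[i], starts[i + 1]) for i in range(n)]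
-- ===== Notes on version B (the rewrite author's own statement) =====
-- stated objective: alternative
-- what changed: Replaces A's single streaming loop (running 'ini' accumulator with per-element branch on the last-two-index overrides) by first building a prefix-sum table of start positions and then assembling the intervals from the table, with the >=600 overrides handled as two explicit trailing entries outside the main assembly.
import Mathlib
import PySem

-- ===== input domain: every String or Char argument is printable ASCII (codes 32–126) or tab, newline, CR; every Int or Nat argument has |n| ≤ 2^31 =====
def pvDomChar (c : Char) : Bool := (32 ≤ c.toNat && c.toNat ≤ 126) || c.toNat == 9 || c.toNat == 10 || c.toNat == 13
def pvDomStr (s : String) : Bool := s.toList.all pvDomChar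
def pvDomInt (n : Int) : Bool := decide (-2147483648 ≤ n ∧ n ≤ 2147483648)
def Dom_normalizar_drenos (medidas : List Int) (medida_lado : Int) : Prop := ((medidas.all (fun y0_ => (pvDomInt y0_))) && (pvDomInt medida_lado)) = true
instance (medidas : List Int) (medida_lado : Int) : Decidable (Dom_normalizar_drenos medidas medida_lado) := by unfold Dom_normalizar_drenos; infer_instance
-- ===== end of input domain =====

-- B separates the prefix-sum table of start positions from the interval assembly,
-- replacing A's streaming branch-per-element accumulator (objective: simpler decomposition).

-- ===== PORT A =====
-- loop body of A's `for i, dreno in enumerate(medidas)`: state (i, ini, acc)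
def stepA (medida_lado n : Int) : Int × Int × List (Int × Int) → Int → Int × Int × List (Int × Int)
  | (i, ini, acc), dreno =>
  if medida_lado ≥ 600 ∧ i = n - 2 then
    (i + 1, medida_lado - 200, acc ++ [(ini, medida_lado - 200)])
  else if medida_lado ≥ 600 ∧ i = n - 1 then
    (i + 1, medida_lado, acc ++ [(medida_lado - 200, medida_lado)])
  else
    (i + 1, ini + dreno, acc ++ [(ini, ini + dreno)])

def normalizar_drenos (medidas : List Int) (medida_lado : Int) : List (Int × Int) :=
  (medidas.foldl (stepA medida_lado (medidas.length : Int)) (0, 0, [])).2.2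

-- ===== PORT B =====
-- loop body of B's starts-building loop: state (starts, s)
def stepB (st : List Int × Int) (m : Int) : List Int × Int :=
  (st.1 ++ [st.2 + m], st.2 + m)

-- Python's starts[i] is always in range here, so list.getD is exact
def normalizar_drenos_alt (medidas : List Int) (medida_lado : Int) : List (Int × Int) :=
  let n := medidas.length
  let starts := (medidas.foldl stepB ([0], 0)).1
  if medida_lado ≥ 600 ∧ n ≥ 1 then
    let res := (List.range (n - 2)).map (fun i => (starts.getD i 0, starts.getD (i + 1) 0))
    let res := if n ≥ 2 then res ++ [(starts.getD (n - 2) 0, medida_lado - 200)] else res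
    res ++ [(medida_lado - 200, medida_lado)]
  else
    (List.range n).map (fun i => (starts.getD i 0, starts.getD (i + 1) 0))

-- ===== PRECONDITION & SPEC =====
def Spec_normalizar_drenos (medidas : List Int) (medida_lado : Int) (out : List (Int × Int)) : Prop := out = normalizar_drenos_alt medidas medida_lado
instance (medidas : List Int) (medida_lado : Int) (out : List (Int × Int)) : Decidable (Spec_normalizar_drenos medidas medida_lado out) := by unfold Spec_normalizar_drenos; infer_instance

-- ===== CLAIM (what is proved, stated in full; the proofs are below) =====
def Claim_equal_normalizar_drenos : Prop := ∀ (medidas : List Int) (medida_lado : Int), Dom_normalizar_drenos medidas medida_lado → Spec_normalizar_drenos medidas medida_lado (normalizar_drenos medidas medida_lado)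

-- ===== LEMMAS AND PROOFS =====

-- the sequence of intervals produced from start position s with no special-casing
def ivs (s : Int) : List Int → List (Int × Int)
  | [] => []
  | m :: t => (s, s + m) :: ivs (s + m) t

-- the prefix-position table starting at s
def P (s : Int) : List Int → List Int
  | [] => [s]
  | m :: t => s :: P (s + m) t

lemma foldB_eq (l : List Int) : ∀ (acc : List Int) (s : Int),
    l.foldl stepB (acc ++ [s], s) = (acc ++ P s l, s + l.sum) := by
  induction l with
  | nil => intro acc s; simp [P]
  | cons m t ih =>
    intro acc s
    have : stepB (acc ++ [s], s) m = ((acc ++ [s]) ++ [s + m], s + m) := by simp [stepB]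
    simp only [List.foldl_cons, this, ih]
    simp [P]; ring

lemma P_getD_zero (s : Int) (l : List Int) : (P s l)[0]?.getD 0 = s := by
  cases l <;> simp [P]

lemma getD_P (l : List Int) : ∀ (i : ℕ) (s : Int), i ≤ l.length →
    (P s l).getD i 0 = s + (l.take i).sum := by
  induction l with
  | nil =>
    intro i s hi
    have : i = 0 := Nat.le_zero.mp hi
    subst this; simp [P]
  | cons m t ih =>
    intro i s hi
    cases i with
    | zero => simp [P]
    | succ j =>
      simp only [P, List.getD_cons_succ]
      rw [ih j (s + m) (by simpa using hi)]
      simp [List.take_succ_cons]; ring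

lemma map_ivs (extra : List Int) : ∀ (l : List Int) (s : Int),
    (List.range l.length).map
      (fun i => ((P s (l ++ extra)).getD i 0, (P s (l ++ extra)).getD (i + 1) 0)) = ivs s l := by
  intro l
  induction l with
  | nil => intro s; simp [ivs]
  | cons m t ih =>
    intro s
    rw [List.length_cons, List.range_succ_eq_map]
    simp only [List.map_cons, List.map_map, ivs]
    congr 1
    · simp [P, P_getD_zero]

    · rw [← ih (s + m)]
      apply List.map_congr_left
      intro i _
      simp [P, Function.comp]

lemma plainA (ml n : Int) : ∀ (l : List Int) (i ini : Int) (acc : List (Int × Int)),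
    (ml < 600 ∨ i + (l.length : Int) ≤ n - 2) →
    l.foldl (stepA ml n) (i, ini, acc) = (i + l.length, ini + l.sum, acc ++ ivs ini l) := by
  intro l
  induction l with
  | nil => intro i ini acc _; simp [ivs]
  | cons m t ih =>
    intro i ini acc h
    have h1 : ¬ (ml ≥ 600 ∧ i = n - 2) := by
      rcases h with h | h
      · omega
      · simp only [List.length_cons] at h; push_cast at h; omega
    have h2 : ¬ (ml ≥ 600 ∧ i = n - 1) := by
      rcases h with h | h
      · omega
      · simp only [List.length_cons] at h; push_cast at h; omega
    have hs : stepA ml n (i, ini, acc) m = (i + 1, ini + m, acc ++ [(ini, ini + m)]) := by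
      simp [stepA, h1, h2]
    rw [List.foldl_cons, hs, ih (i + 1) (ini + m) (acc ++ [(ini, ini + m)])
      (by rcases h with h | h
          · exact Or.inl h
          · right; simp only [List.length_cons] at h ⊢; push_cast at h ⊢; omega)]
    simp [ivs]
    constructor
    · ring
    · ring

lemma starts_eq (medidas : List Int) : (medidas.foldl stepB ([0], 0)).1 = P 0 medidas := by
  have := foldB_eq medidas [] 0
  simp at this
  simp [this]

-- A's loop on a list ending in two elements, with medida_lado ≥ 600: the two overrides fire
lemma A_loop2 (front : List Int) (a b ml N : Int) (hml : ml ≥ 600)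
    (hN : N = (front.length : Int) + 2) :
    ((front ++ [a, b]).foldl (stepA ml N) (0, 0, ([] : List (Int × Int)))).2.2 =
      ivs 0 front ++ [(front.sum, ml - 200), (ml - 200, ml)] := by
  rw [List.foldl_append, plainA ml N front 0 0 [] (by right; omega)]
  simp only [zero_add, List.nil_append, List.foldl_cons, List.foldl_nil]
  have s1 : stepA ml N ((front.length : Int), front.sum, ivs 0 front) a =
      ((front.length : Int) + 1, ml - 200, ivs 0 front ++ [(front.sum, ml - 200)]) := by
    simp only [stepA]
    rw [if_pos ⟨hml, by omega⟩]
  have s2 : stepA ml N ((front.length : Int) + 1, ml - 200,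
        ivs 0 front ++ [(front.sum, ml - 200)]) b =
      ((front.length : Int) + 1 + 1, ml,
        (ivs 0 front ++ [(front.sum, ml - 200)]) ++ [(ml - 200, ml)]) := by
    simp only [stepA]
    rw [if_neg (by omega), if_pos ⟨hml, by omega⟩]
  rw [s1, s2]
  simp [List.append_assoc]

lemma A_concat2 (front : List Int) (a b ml : Int) (hml : ml ≥ 600) :
    normalizar_drenos (front ++ [a, b]) ml =
      ivs 0 front ++ [(front.sum, ml - 200), (ml - 200, ml)] := by
  unfold normalizar_drenos
  exact A_loop2 front a b ml _ hml (by simp)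

lemma B_concat2 (front : List Int) (a b ml : Int) (hml : ml ≥ 600) :
    normalizar_drenos_alt (front ++ [a, b]) ml =
      ivs 0 front ++ [(front.sum, ml - 200), (ml - 200, ml)] := by
  have hn : (front ++ [a, b]).length = front.length + 2 := by simp
  simp only [normalizar_drenos_alt, starts_eq]
  rw [if_pos ⟨hml, by rw [hn]; omega⟩, if_pos (by rw [hn]; omega), hn]
  simp only [Nat.add_sub_cancel]
  rw [map_ivs [a, b] front 0]
  rw [getD_P (front ++ [a, b]) front.length 0 (by simp), List.take_left]
  simp [List.append_assoc]

theorem main_eq (medidas : List Int) (medida_lado : Int) :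
    normalizar_drenos medidas medida_lado = normalizar_drenos_alt medidas medida_lado := by
  by_cases hml : medida_lado ≥ 600
  · rcases medidas.eq_nil_or_concat with rfl | ⟨l1, b, h⟩
    · simp [normalizar_drenos, normalizar_drenos_alt]
    · rcases l1.eq_nil_or_concat with rfl | ⟨front, a, h2⟩
      · -- singleton [b]
        simp only [List.concat_eq_append, List.nil_append] at h
        subst h
        have hA : normalizar_drenos [b] medida_lado = [(medida_lado - 200, medida_lado)] := by
          have h1 : ¬ (medida_lado ≥ 600 ∧ (0 : Int) = (([b] : List Int).length : Int) - 2) := by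
            simp
          have h2 : medida_lado ≥ 600 ∧ (0 : Int) = (([b] : List Int).length : Int) - 1 :=
            ⟨hml, by simp⟩
          simp only [normalizar_drenos, List.foldl_cons, List.foldl_nil, stepA]
          rw [if_neg h1, if_pos h2]
          simp
        have hB : normalizar_drenos_alt [b] medida_lado = [(medida_lado - 200, medida_lado)] := by
          have h1 : medida_lado ≥ 600 ∧ ([b] : List Int).length ≥ 1 := ⟨hml, by simp⟩
          have h2 : ¬ (([b] : List Int).length ≥ 2) := by simp
          simp only [normalizar_drenos_alt]
          rw [if_pos h1, if_neg h2]
          simp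
        rw [hA, hB]
      · subst h2
        simp only [List.concat_eq_append, List.append_assoc, List.singleton_append] at h
        subst h
        rw [A_concat2 front a b medida_lado hml, B_concat2 front a b medida_lado hml]
  · -- no override fires anywhere
    have hml' : medida_lado < 600 := by omega
    have hA : normalizar_drenos medidas medida_lado = ivs 0 medidas := by
      unfold normalizar_drenos
      rw [plainA medida_lado (medidas.length : Int) medidas 0 0 [] (Or.inl hml')]
      simp
    have hB : normalizar_drenos_alt medidas medida_lado = ivs 0 medidas := by
      simp only [normalizar_drenos_alt, starts_eq]
      rw [if_neg (fun h => absurd h.1 (by omega))]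
      have := map_ivs [] medidas 0
      rwa [List.append_nil] at this
    rw [hA, hB]

-- ===== VERDICT (by name: the statement is the Claim_ definition above) =====
theorem normalizar_drenos_spec : Claim_equal_normalizar_drenos := by
  intro medidas medida_lado _
  exact main_eq medidas medida_lado
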